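-- pv_equiv track=rewrite | github.com/SeraphWedd/CodeChef_Codes-Python-3.x- | beginner/NOTINCOM.py | nothingcom
-- ===== SOURCE A (Python) =====
-- def nothingcom(n, m, a, b):
--     dic = {}
--     for i in range(n):
--         try:
--             dic[a[i]] += 1
--         except KeyError:
--             dic[a[i]] = 0
--
--     for i in range(m):
--         try:
--             dic[b[i]] += 1
--         except KeyError:
--             dic[b[i]] = 0
--     return sum(dic.values())
-- ===== SOURCE B (Python) =====
-- def nothingcom(n, m, a, b):
--     vals = sorted([a[i] for i in range(n)] + [b[i] for i in range(m)])
--     return sum(1 for x, y in zip(vals, vals[1:]) if x == y)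
-- ===== Notes on version B (the rewrite author's own statement) =====
-- stated objective: alternative
-- what changed: A builds a dict of per-key counters via try/except and sums its values; B collects the selected elements, sorts them once, and counts adjacent equal pairs in the sorted list, which equals the same total-minus-distinct quantity with no hash container at all. Pre_ excludes only n > len(a) or m > len(b), where A raises IndexError. Despite the extra log factor, B measured faster at all tested sizes: the sort and the zip-scan run in C, where A's per-element dict updates run in the Python interpreter.
import Mathlib
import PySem

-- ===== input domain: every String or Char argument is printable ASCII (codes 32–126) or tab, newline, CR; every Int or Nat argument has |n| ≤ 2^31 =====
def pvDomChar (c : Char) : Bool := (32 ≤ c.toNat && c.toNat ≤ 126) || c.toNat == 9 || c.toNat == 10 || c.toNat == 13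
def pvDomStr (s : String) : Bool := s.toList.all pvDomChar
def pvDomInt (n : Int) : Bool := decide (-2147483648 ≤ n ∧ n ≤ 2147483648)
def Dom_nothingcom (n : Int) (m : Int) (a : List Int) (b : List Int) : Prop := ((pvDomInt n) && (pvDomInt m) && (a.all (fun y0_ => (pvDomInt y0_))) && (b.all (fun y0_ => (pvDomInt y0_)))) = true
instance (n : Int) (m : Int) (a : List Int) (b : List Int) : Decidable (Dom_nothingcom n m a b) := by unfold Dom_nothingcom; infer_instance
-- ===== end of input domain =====

-- B replaces A's dict of per-key counters (built with try/except and summed) by sorting the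
-- selected elements once and counting adjacent equal pairs — the same total-minus-distinct
-- quantity computed with no hash container (objective: alternative).

-- ===== PORT A =====
-- the body of A's two loops: try dic[k] += 1 / except KeyError: dic[k] = 0
def nothingcomStep (d : PySem.Dict Int Int) (k : Int) : PySem.Dict Int Int :=
  match d.get? k with
  | some v => d.insert k (v + 1)
  | none   => d.insert k 0

def nothingcom (n : Int) (m : Int) (a : List Int) (b : List Int) : Int :=
  let dic : PySem.Dict Int Int := PySem.Dict.empty
  let dic := (PySem.List.pyRange 0 n 1).foldl
    (fun d i => nothingcomStep d (PySem.List.pyGetD a i 0)) dic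
  let dic := (PySem.List.pyRange 0 m 1).foldl
    (fun d i => nothingcomStep d (PySem.List.pyGetD b i 0)) dic
  dic.values.sum

-- ===== PORT B =====
def nothingcom_alt (n : Int) (m : Int) (a : List Int) (b : List Int) : Int :=
  let vals := PySem.List.sorted
    ((PySem.List.pyRange 0 n 1).map (fun i => PySem.List.pyGetD a i 0)
      ++ (PySem.List.pyRange 0 m 1).map (fun i => PySem.List.pyGetD b i 0)) (fun x => x) false
  -- sum(1 for x, y in zip(vals, vals[1:]) if x == y)
  (vals.zip (PySem.List.slice vals (some 1) none)).foldl
    (fun acc p => if p.1 = p.2 then acc + 1 else acc) 0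

-- ===== PRECONDITION & SPEC =====
-- Pre_ excludes exactly n > len(a) or m > len(b), where A raises IndexError on a[i]/b[i].
def Pre_nothingcom (n : Int) (m : Int) (a : List Int) (b : List Int) : Prop :=
  n ≤ (a.length : Int) ∧ m ≤ (b.length : Int)
instance (n : Int) (m : Int) (a : List Int) (b : List Int) : Decidable (Pre_nothingcom n m a b) := by unfold Pre_nothingcom; infer_instance

def pvWitness_nothingcom : Int × Int × List Int × List Int := (2, 1, [1, 1], [5])

def Spec_nothingcom (n : Int) (m : Int) (a : List Int) (b : List Int) (out : Int) : Prop := out = nothingcom_alt n m a b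
instance (n : Int) (m : Int) (a : List Int) (b : List Int) (out : Int) : Decidable (Spec_nothingcom n m a b out) := by unfold Spec_nothingcom; infer_instance

-- ===== CLAIM (what is proved, stated in full; the proofs are below) =====
def Claim_equal_nothingcom : Prop := ∀ (n : Int) (m : Int) (a : List Int) (b : List Int), Dom_nothingcom n m a b → Pre_nothingcom n m a b → Spec_nothingcom n m a b (nothingcom n m a b)

-- ===== LEMMAS AND PROOFS =====

-- A's try/except body is an insert of getD(k, -1) + 1
lemma nothingcomStep_eq (d : PySem.Dict Int Int) (k : Int) :
    nothingcomStep d k = d.insert k (d.getD k (-1) + 1) := by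
  unfold nothingcomStep
  cases h : d.get? k <;>
    simp [PySem.Dict.getD_eq_get?_getD, h]

-- an index loop 'for i in range(n)' reading xs[i] is a fold over xs.take n
lemma foldl_pyRange_take {σ : Type} (xs : List Int) (n : Int)
    (hn : n ≤ (xs.length : Int)) (f : σ → Int → σ) (init : σ) :
    (PySem.List.pyRange 0 n 1).foldl (fun s i => f s (PySem.List.pyGetD xs i 0)) init
      = (xs.take n.toNat).foldl f init := by
  by_cases h0 : 0 ≤ n
  case neg =>
    rw [PySem.List.pyRange_one_eq_nil (by omega),
        show n.toNat = 0 by omega]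
    simp
  have hlen : ((xs.take n.toNat).length : Int) = n := by
    simp [List.length_take]; omega
  have hcongr : (PySem.List.pyRange 0 n 1).foldl
      (fun s i => f s (PySem.List.pyGetD xs i 0)) init
      = (PySem.List.pyRange 0 n 1).foldl
      (fun s i => f s (PySem.List.pyGetD (xs.take n.toNat) i 0)) init := by
    apply PySem.List.foldl_congr_mem
    intro acc x hx
    rw [PySem.List.mem_pyRange_one] at hx
    have hxlt : x < ((xs.take n.toNat).length : Int) := by omega
    have hxlt' : x < (xs.length : Int) := by omega
    rw [PySem.List.pyGetD_eq_getElem xs 0 hx.1 hxlt',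
        PySem.List.pyGetD_eq_getElem (xs.take n.toNat) 0 hx.1 hxlt]
    rw [List.getElem_take]
  rw [hcongr]
  have h := PySem.List.foldl_pyRange_zero_pyGetD' (xs.take n.toNat) 0 f init
  rw [hlen] at h
  exact h

-- the value stored at v after folding A's step is (initial value) + count of v
lemma getD_foldl_nothingcomStep (ks : List Int) (d : PySem.Dict Int Int) (v : Int) :
    (ks.foldl nothingcomStep d).getD v (-1) = d.getD v (-1) + (ks.count v : Int) := by
  induction ks generalizing d with
  | nil => simp
  | cons x ks ih =>
    rw [List.foldl_cons, ih, nothingcomStep_eq, PySem.Dict.getD_insert,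
        List.count_cons]
    by_cases hvx : v = x
    · simp [hvx]; ring
    · simp [hvx]; omega

lemma foldl_nothingcomStep_eq_insert (ks : List Int) (d : PySem.Dict Int Int) :
    ks.foldl nothingcomStep d
      = ks.foldl (fun d x => d.insert x (d.getD x (-1) + 1)) d := by
  apply PySem.List.foldl_congr_mem
  intro acc x _
  exact nothingcomStep_eq acc x

-- A's final dict, started empty, sums to (#items) - (#distinct)
lemma sum_values_foldl_nothingcomStep (ks : List Int) :
    (ks.foldl nothingcomStep PySem.Dict.empty).values.sum
      = (ks.length : Int) - (ks.toFinset.card : Int) := by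
  set d := ks.foldl nothingcomStep PySem.Dict.empty with hd
  have hkeys : d.keys = PySem.Set.ofList ks := by
    rw [hd, foldl_nothingcomStep_eq_insert, PySem.Dict.keys_foldl_insert]
    simp [PySem.Set.update_nil_left]
  have hnodup : d.keys.Nodup := by rw [hkeys]; exact PySem.Set.nodup_ofList ks
  rw [PySem.Dict.values_eq_map_keys d hnodup (-1), hkeys]
  have hval : ∀ v, d.getD v (-1) = (ks.count v : Int) + (-1) := by
    intro v
    rw [hd, getD_foldl_nothingcomStep]
    simp; ring
  rw [List.map_congr_left (fun v _ => hval v), PySem.List.sum_map_add_int,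
      PySem.List.sum_map_const_int]
  have hperm : (PySem.Set.ofList ks).Perm ks.dedup := by
    refine (List.perm_ext_iff_of_nodup (PySem.Set.nodup_ofList ks) ks.nodup_dedup).mpr ?_
    intro v
    rw [PySem.Set.mem_ofList, List.mem_dedup]
  have hsum : ((PySem.Set.ofList ks).map (fun v => (ks.count v : Int))).sum
      = ((ks.dedup.map (fun v => ks.count v)).sum : Int) := by
    rw [(hperm.map (fun v => ((ks.count v : Nat) : Int))).sum_eq]
    rw [Nat.cast_list_sum, List.map_map]
    rfl
  have hcard : (PySem.Set.ofList ks).length = ks.toFinset.card := by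
    rw [← List.toFinset_card_of_nodup (PySem.Set.nodup_ofList ks)]
    congr 1
    ext v
    simp [PySem.Set.mem_ofList]
  rw [hsum, List.sum_map_count_dedup_eq_length, hcard]
  ring

-- the comprehension '[xs[i] for i in range(n)]' is xs.take n (n ≤ len xs)
lemma map_pyRange_take (xs : List Int) (n : Int) (hn : n ≤ (xs.length : Int)) :
    (PySem.List.pyRange 0 n 1).map (fun i => PySem.List.pyGetD xs i 0)
      = xs.take n.toNat := by
  have h := foldl_pyRange_take xs n hn
    (fun (s : List Int) (x : Int) => s ++ [x]) []
  rw [PySem.List.foldl_append_singleton_eq_map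
    (fun i => PySem.List.pyGetD xs i 0) (PySem.List.pyRange 0 n 1) []] at h
  rw [PySem.List.foldl_append_singleton, List.nil_append] at h
  exact h

-- B's loop body over the zip is a 0/1 count of adjacent equal pairs
lemma foldl_adj_eq_countP (l : List Int) :
    (l.zip (l.tail)).foldl (fun acc p => if p.1 = p.2 then acc + 1 else acc) 0
      = ((l.zip l.tail).countP (fun p => p.1 == p.2) : Int) := by
  have h := PySem.List.foldl_count_if (fun p : Int × Int => p.1 == p.2) (l.zip l.tail) 0
  simpa using h

-- in a sorted (Pairwise ≤) list, #adjacent-equal-pairs + #distinct = length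
lemma countP_adj_sorted (l : List Int) (hs : l.Pairwise (· ≤ ·)) :
    (l.zip l.tail).countP (fun p => p.1 == p.2) + l.toFinset.card = l.length := by
  induction l with
  | nil => simp
  | cons x t ih =>
    cases t with
    | nil => simp
    | cons y t =>
      have hxy : x ≤ y := (List.pairwise_cons.mp hs).1 y (by simp)
      have hrest := (List.pairwise_cons.mp hs).2
      have ih' := ih hrest
      by_cases hxeqy : x = y
      · have hmem : x ∈ y :: t := by simp [hxeqy]
        have : (x :: y :: t).toFinset = (y :: t).toFinset := by
          simp only [List.toFinset_cons]
          exact Finset.insert_eq_self.mpr (by simpa using hmem)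
        simp only [List.zip_cons_cons, List.tail_cons, List.countP_cons, this] at *
        simp only [List.length_cons] at *
        simp [hxeqy] at *
        omega
      · have hxnot : x ∉ (y :: t) := by
          intro hmem
          rcases List.mem_cons.mp hmem with h | h
          · exact hxeqy h
          · have : y ≤ x := (List.pairwise_cons.mp hrest).1 x h
            exact hxeqy (le_antisymm hxy this)
        have hcard : (x :: y :: t).toFinset.card = (y :: t).toFinset.card + 1 := by
          simp only [List.toFinset_cons]
          exact Finset.card_insert_of_notMem (by simpa using hxnot)
        simp only [List.zip_cons_cons, List.tail_cons, List.countP_cons] at *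
        simp only [List.length_cons] at *
        simp [hxeqy] at *
        omega

-- ===== VERDICT (by name: the statement is the Claim_ definition above) =====
theorem nothingcom_spec : Claim_equal_nothingcom := by
  intro n m a b _ hpre
  obtain ⟨hna, hmb⟩ := hpre
  unfold Spec_nothingcom nothingcom nothingcom_alt
  dsimp only
  rw [foldl_pyRange_take a n hna, foldl_pyRange_take b m hmb,
      ← List.foldl_append, sum_values_foldl_nothingcomStep,
      map_pyRange_take a n hna, map_pyRange_take b m hmb,
      PySem.List.slice_from_one]
  set ks := a.take n.toNat ++ b.take m.toNat with hks
  set l := PySem.List.sorted ks (fun x => x) false with hl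
  have hperm : l.Perm ks := PySem.List.sorted_perm ks (fun x => x) false
  have hsorted : l.Pairwise (· ≤ ·) := by
    simpa using PySem.List.sorted_pairwise ks (fun x => x)
  have hadj := countP_adj_sorted l hsorted
  rw [foldl_adj_eq_countP, hperm.length_eq.symm,
      show ks.toFinset = l.toFinset from (List.toFinset_eq_of_perm l ks hperm).symm]
  omega
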